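-- pv_equiv track=rewrite | github.com/duyphongdn1997/CodeLearn | Python/Activities/sequenceNumber.py | sequenceNumber
-- ===== SOURCE A (Python) =====
-- def sequenceNumber(l,r):
--     a  = '123456789'
--     arr = []
--     for i in range(len(str(r))+1):
--         if i != 0:
--             for v in range(len(a)):
--                 if int(a[v:v+i]) <= r and int(a[v:v+i]) >= l:
--                     arr.append(int(a[v:v+i]))
--     return sorted(list(set(arr)))
-- ===== SOURCE B (Python) =====
-- def sequenceNumber(l, r):
--     # Fixed 45-entry candidate table built arithmetically (n = n*10 + next digit),
--     # no strings, no set-based dedup, independent of len(str(r)); then filter and sort.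
--     candidates = []
--     for s in range(1, 10):
--         n = 0
--         for d in range(s, 10):
--             n = n * 10 + d
--             candidates.append(n)
--     return sorted([x for x in candidates if l <= x <= r])
-- ===== Notes on version B (the rewrite author's own statement) =====
-- stated objective: simpler
-- what changed: A slices the digit string '123456789' inside a doubly-nested loop whose outer bound is len(str(r)), parses each slice with int(), and deduplicates with set(); B builds each of the 45 consecutive-digit candidates exactly once by pure arithmetic (n = n*10 + next digit) in a fixed table independent of r, so no strings, no reparsing and no set-based dedup are needed before the single filter-and-sort.
import Mathlib
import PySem

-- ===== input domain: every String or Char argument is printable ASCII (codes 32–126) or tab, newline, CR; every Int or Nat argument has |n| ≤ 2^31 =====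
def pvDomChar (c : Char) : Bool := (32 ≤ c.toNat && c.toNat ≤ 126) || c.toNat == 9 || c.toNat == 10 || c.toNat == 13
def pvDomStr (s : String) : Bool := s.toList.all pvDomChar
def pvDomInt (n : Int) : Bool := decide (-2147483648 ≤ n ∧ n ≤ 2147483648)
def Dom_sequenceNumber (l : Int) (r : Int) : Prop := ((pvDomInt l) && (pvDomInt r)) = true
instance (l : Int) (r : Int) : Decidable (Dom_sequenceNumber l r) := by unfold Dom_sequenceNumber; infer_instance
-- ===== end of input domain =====

-- B replaces A's digit-string slicing over a window bounded by len(str(r)) (plus set-dedup)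
-- by one arithmetic pass building each of the 45 consecutive-digit candidates exactly once,
-- then a single filter-and-sort; objective: simpler (no strings, no set).

-- ===== PORT A =====
-- int() is applied only to nonempty all-digit slices (1 ≤ i, v ≤ 8), where Python's int() cannot
-- raise, so `.getD 0` is exact here.
def sequenceNumber (l : Int) (r : Int) : List Int :=
  let a := "123456789"
  let arr : List Int :=
    (PySem.List.pyRange 0 (PySem.Str.len (PySem.Int.toStr r) + 1) 1).foldl (fun arr i =>
      if i ≠ 0 then
        (PySem.List.pyRange 0 (PySem.Str.len a) 1).foldl (fun arr v =>
          if (PySem.Int.ofStr? (PySem.Str.slice a (some v) (some (v + i)))).getD 0 ≤ r ∧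
             l ≤ (PySem.Int.ofStr? (PySem.Str.slice a (some v) (some (v + i)))).getD 0 then
            arr ++ [(PySem.Int.ofStr? (PySem.Str.slice a (some v) (some (v + i)))).getD 0]
          else arr) arr
      else arr) []
  PySem.List.sorted (PySem.Set.ofList arr) (fun x => x) false

-- ===== PORT B =====
def sequenceNumber_alt (l : Int) (r : Int) : List Int :=
  let candidates : List Int :=
    (PySem.List.pyRange 1 10 1).foldl (fun cs s =>
      ((PySem.List.pyRange s 10 1).foldl (fun (p : List Int × Int) d =>
          (p.1 ++ [p.2 * 10 + d], p.2 * 10 + d)) (cs, 0)).1) []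
  PySem.List.sorted (candidates.filter (fun x => decide (l ≤ x) && decide (x ≤ r))) (fun x => x) false

-- ===== PRECONDITION & SPEC =====
def Spec_sequenceNumber (l : Int) (r : Int) (out : List Int) : Prop := out = sequenceNumber_alt l r
instance (l : Int) (r : Int) (out : List Int) : Decidable (Spec_sequenceNumber l r out) := by unfold Spec_sequenceNumber; infer_instance

-- ===== CLAIM (what is proved, stated in full; the proofs are below) =====
def Claim_equal_sequenceNumber : Prop := ∀ (l : Int) (r : Int), Dom_sequenceNumber l r → Spec_sequenceNumber l r (sequenceNumber l r)

-- ===== LEMMAS AND PROOFS =====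

-- B's candidate table, as a literal.
def pvTable : List Int :=
  [1, 12, 123, 1234, 12345, 123456, 1234567, 12345678, 123456789,
   2, 23, 234, 2345, 23456, 234567, 2345678, 23456789,
   3, 34, 345, 3456, 34567, 345678, 3456789,
   4, 45, 456, 4567, 45678, 456789,
   5, 56, 567, 5678, 56789,
   6, 67, 678, 6789,
   7, 78, 789,
   8, 89,
   9]

def pvChars : List Char := ['1','2','3','4','5','6','7','8','9']

-- the int A computes from the slice a[v:v+i]
def pvRun (v i : Nat) : Int := (PySem.Int.ofChars? (List.take i (List.drop v pvChars))).getD 0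

-- the predicate of A's filter
def pvP (l r : Int) : Int → Bool := fun x => decide (x ≤ r) && decide (l ≤ x)

-- all slice-ints A's loops produce for outer bound d
def pvSlices (d : Nat) : List Int :=
  (List.range (d+1)).flatMap (fun i => if i = 0 then [] else (List.range 9).map (fun v => pvRun v i))

lemma pv_B_shape (l r : Int) :
    sequenceNumber_alt l r =
      PySem.List.sorted (pvTable.filter (fun x => decide (l ≤ x) && decide (x ≤ r))) (fun x => x) false := by
  rfl

lemma pv_inner (l r : Int) (iN : Nat) (acc : List Int) :
    (PySem.List.pyRange 0 (PySem.Str.len "123456789") 1).foldl (fun arr v =>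
      if (PySem.Int.ofStr? (PySem.Str.slice "123456789" (some v) (some (v + (iN : Int))))).getD 0 ≤ r ∧
         l ≤ (PySem.Int.ofStr? (PySem.Str.slice "123456789" (some v) (some (v + (iN : Int))))).getD 0 then
        arr ++ [(PySem.Int.ofStr? (PySem.Str.slice "123456789" (some v) (some (v + (iN : Int))))).getD 0]
      else arr) acc
    = acc ++ ((List.range 9).map (fun v => pvRun v iN)).filter (pvP l r) := by
  have h9 : PySem.Str.len "123456789" = ((9 : Nat) : Int) := by decide
  rw [h9, PySem.List.pyRange_zero_nat, List.foldl_map]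
  have hbody : ∀ (v : Nat),
      (PySem.Int.ofStr? (PySem.Str.slice "123456789" (some (v : Int)) (some ((v : Int) + (iN : Int))))).getD 0
      = pvRun v iN := by
    intro v
    simp only [PySem.Str.slice, PySem.Int.ofStr?, PySem.Chars.slice]
    rw [PySem.List.slice_natCast_add]
    have h : "123456789".toList = pvChars := rfl
    rw [h, pvRun]
    congr 1
    exact congrArg _ (String.toList_ofList)
  have hfun : (fun (arr : List Int) (v : Nat) =>
      if (PySem.Int.ofStr? (PySem.Str.slice "123456789" (some (v:Int)) (some ((v:Int) + (iN : Int))))).getD 0 ≤ r ∧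
         l ≤ (PySem.Int.ofStr? (PySem.Str.slice "123456789" (some (v:Int)) (some ((v:Int) + (iN : Int))))).getD 0 then
        arr ++ [(PySem.Int.ofStr? (PySem.Str.slice "123456789" (some (v:Int)) (some ((v:Int) + (iN : Int))))).getD 0]
      else arr)
      = (fun arr v => if pvP l r (pvRun v iN) = true then arr ++ [pvRun v iN] else arr) := by
    funext arr v
    rw [hbody v]
    simp [pvP]
  rw [hfun, PySem.List.foldl_append_if, List.filter_map]
  rfl

lemma pv_A_shape (l r : Int) :
    sequenceNumber l r =
      PySem.List.sorted (PySem.Set.ofList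
        ((pvSlices (PySem.Int.toChars r).length).filter (pvP l r))) (fun x => x) false := by
  have hlen : PySem.Str.len (PySem.Int.toStr r) + 1
      = (((PySem.Int.toChars r).length + 1 : Nat) : Int) := by
    rw [PySem.Str.len_eq, PySem.Int.toList_toStr]; push_cast; ring
  unfold sequenceNumber
  dsimp only
  rw [hlen, PySem.List.pyRange_zero_nat, List.foldl_map]
  have hstep : (fun (arr : List Int) (iN : Nat) =>
      if (iN : Int) ≠ 0 then
        (PySem.List.pyRange 0 (PySem.Str.len "123456789") 1).foldl (fun arr v =>
          if (PySem.Int.ofStr? (PySem.Str.slice "123456789" (some v) (some (v + (iN : Int))))).getD 0 ≤ r ∧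
             l ≤ (PySem.Int.ofStr? (PySem.Str.slice "123456789" (some v) (some (v + (iN : Int))))).getD 0 then
            arr ++ [(PySem.Int.ofStr? (PySem.Str.slice "123456789" (some v) (some (v + (iN : Int))))).getD 0]
          else arr) arr
      else arr)
      = (fun arr iN => arr ++ (if iN = 0 then [] else
          (((List.range 9).map (fun v => pvRun v iN)).filter (pvP l r)))) := by
    funext arr iN
    by_cases h0 : iN = 0
    · simp [h0]
    · rw [if_pos (by exact_mod_cast h0), pv_inner, if_neg h0]
  rw [hstep, PySem.List.foldl_append_eq_flatMap, List.nil_append]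
  congr 1
  rw [pvSlices, List.filter_flatMap]
  have hpt : (fun (iN : Nat) => if iN = 0 then ([] : List Int) else
        List.filter (pvP l r) (List.map (fun v => pvRun v iN) (List.range 9)))
      = (fun iN => List.filter (pvP l r)
          (if iN = 0 then [] else List.map (fun v => pvRun v iN) (List.range 9))) := by
    funext i
    by_cases h0 : i = 0
    · simp [h0]
    · simp [h0]
  rw [hpt]

lemma pv_bounded : ∀ v ∈ List.range 9, ∀ j ∈ List.range 10, 1 ≤ j → pvRun v j ∈ pvTable := by decide

lemma pv_run_mem (v : Nat) (hv : v < 9) (i : Nat) (hi : 1 ≤ i) : pvRun v i ∈ pvTable := by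
  have hlen : (List.drop v pvChars).length = 9 - v := by simp [pvChars]
  by_cases h : 9 - v ≤ i
  · have heq : List.take i (List.drop v pvChars) = List.take (9 - v) (List.drop v pvChars) := by
      rw [List.take_of_length_le (by omega), List.take_of_length_le (by omega)]
    have : pvRun v i = pvRun v (9 - v) := by unfold pvRun; rw [heq]
    rw [this]
    exact pv_bounded v (List.mem_range.mpr hv) (9 - v) (List.mem_range.mpr (by omega)) (by omega)
  · exact pv_bounded v (List.mem_range.mpr hv) i (List.mem_range.mpr (by omega)) hi

lemma pv_slices_subset (d : Nat) : ∀ x ∈ pvSlices d, x ∈ pvTable := by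
  intro x hx
  simp only [pvSlices, List.mem_flatMap, List.mem_range] at hx
  obtain ⟨i, hi, hx⟩ := hx
  by_cases h0 : i = 0
  · simp [h0] at hx
  · rw [if_neg h0] at hx
    obtain ⟨v, hv, rfl⟩ := List.mem_map.mp hx
    exact pv_run_mem v (List.mem_range.mp hv) i (by omega)

lemma pv_slices_mono {d d' : Nat} (h : d ≤ d') : ∀ x ∈ pvSlices d, x ∈ pvSlices d' := by
  intro x hx
  simp only [pvSlices, List.mem_flatMap, List.mem_range] at hx ⊢
  obtain ⟨i, hi, hx⟩ := hx
  exact ⟨i, by omega, hx⟩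

lemma pv_complete_small :
    ∀ d ∈ List.range 10, 1 ≤ d → ∀ x ∈ pvTable, x < 10 ^ d → x ∈ pvSlices d := by decide

lemma pv_table_pos : ∀ x ∈ pvTable, 1 ≤ x := by decide

lemma pv_table_lt : ∀ x ∈ pvTable, x < 10 ^ (9 : Nat) := by decide

lemma pv_table_nodup : pvTable.Nodup := by decide

lemma pv_core_len : ∀ (f n : Nat) (l : List Char), n ≤ f →
    (Nat.toDigitsCore 10 (f+1) n l).length = l.length + Nat.log 10 n + 1 := by
  intro f
  induction f with
  | zero =>
    intro n l hn
    interval_cases n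
    simp [Nat.toDigitsCore]
  | succ f ih =>
    intro n l hn
    rw [Nat.toDigitsCore]
    by_cases h0 : n / 10 = 0
    · have hlt : n < 10 := by omega
      simp [h0, Nat.log_eq_zero_iff.mpr (Or.inl hlt)]
    · rw [if_neg h0]
      have h10 : 10 ≤ n := by omega
      rw [ih (n / 10) _ (by omega)]
      have hlog : Nat.log 10 (n / 10) = Nat.log 10 n - 1 := Nat.log_div_base 10 n
      have hpos : 0 < Nat.log 10 n := Nat.log_pos (by norm_num) h10
      simp [hlog]
      omega

lemma pv_toChars_len (r : Int) (h : 0 ≤ r) :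
    (PySem.Int.toChars r).length = Nat.log 10 r.toNat + 1 := by
  unfold PySem.Int.toChars
  rw [if_neg (by omega), Nat.toDigits]
  rw [pv_core_len r.toNat r.toNat [] le_rfl]
  simp

lemma pv_r_lt (r : Int) (h : 0 ≤ r) : r < 10 ^ (PySem.Int.toChars r).length := by
  rw [pv_toChars_len r h]
  have h1 := Nat.lt_pow_succ_log_self (by norm_num : 1 < 10) r.toNat
  have h2 : r = ((r.toNat : Nat) : Int) := (Int.toNat_of_nonneg h).symm
  rw [h2]
  exact_mod_cast h1

-- ===== VERDICT (by name: the statement is the Claim_ definition above) =====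
theorem sequenceNumber_spec : Claim_equal_sequenceNumber := by
  intro l r _
  unfold Spec_sequenceNumber
  rw [pv_A_shape, pv_B_shape]
  apply PySem.List.sorted_eq_sorted_of_perm _ _ _ (fun a b h => h)
  rw [List.perm_ext_iff_of_nodup (PySem.Set.nodup_ofList _) (pv_table_nodup.filter _)]
  intro x
  rw [PySem.Set.mem_ofList]
  simp only [List.mem_filter, pvP, Bool.and_eq_true, decide_eq_true_eq]
  constructor
  · rintro ⟨hx, hxr, hlx⟩
    exact ⟨pv_slices_subset _ x hx, hlx, hxr⟩
  · rintro ⟨hx, hlx, hxr⟩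
    refine ⟨?_, hxr, hlx⟩
    by_cases hr : 0 ≤ r
    · have hd1 : 1 ≤ (PySem.Int.toChars r).length := by rw [pv_toChars_len r hr]; omega
      have hxlt : x < 10 ^ (PySem.Int.toChars r).length := lt_of_le_of_lt hxr (pv_r_lt r hr)
      by_cases hd : (PySem.Int.toChars r).length ≤ 9
      · exact pv_complete_small _ (List.mem_range.mpr (by omega)) hd1 x hx hxlt
      · exact pv_slices_mono (by omega)
          x (pv_complete_small 9 (by decide) (by norm_num) x hx (pv_table_lt x hx))
    · have : (1 : Int) ≤ x := pv_table_pos x hx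
      omega
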